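-- pv_equiv track=rewrite | github.com/8dspaces/utils | checkio/16_letter_queue.py | letter_queue_2
-- ===== SOURCE A (Python) =====
-- def letter_queue_2(commands):
--     import collections
--     queue = collections.deque()
--     for command in commands:
--         if command.startswith("PUSH"):
--             queue.append(command[-1])
--         elif queue:
--             queue.popleft()
--     return "".join(queue)
-- ===== SOURCE B (Python) =====
-- def letter_queue_2(commands):
--     pushed = []
--     size = 0
--     for command in commands:
--         if command.startswith("PUSH"):
--             pushed.append(command[-1])
--             size += 1
--         elif size:
--             size -= 1
--     return "".join(pushed[len(pushed) - size:])
-- ===== Notes on version B (the rewrite author's own statement) =====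
-- stated objective: alternative
-- what changed: B never maintains a live queue: it records every pushed letter and only a surviving count, then reconstructs the queue as the suffix slice of the pushed letters, instead of A's deque with popleft.
import Mathlib
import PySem

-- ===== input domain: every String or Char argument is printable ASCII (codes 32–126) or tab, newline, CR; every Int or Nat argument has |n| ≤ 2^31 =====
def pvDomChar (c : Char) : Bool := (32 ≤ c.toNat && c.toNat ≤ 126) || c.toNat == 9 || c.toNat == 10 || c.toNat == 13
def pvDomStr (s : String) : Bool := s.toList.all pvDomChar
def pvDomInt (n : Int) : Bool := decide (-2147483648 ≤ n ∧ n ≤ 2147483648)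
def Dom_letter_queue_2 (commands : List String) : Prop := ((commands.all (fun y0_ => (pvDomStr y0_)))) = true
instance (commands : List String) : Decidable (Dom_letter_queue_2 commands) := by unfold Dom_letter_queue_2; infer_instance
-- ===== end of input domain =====

-- B records every pushed letter plus a surviving count and returns the suffix slice,
-- instead of A's live deque with popleft; same cost, different data maintained.


-- ===== PORT A =====
-- the deque loop of A; `command[-1]` is PySem.Str.pyGet? … (-1) (some, since the
-- command starts with "PUSH" and is thus nonempty; the none branch is unreachable)
def lqLoopA : List String → List Char → List Char
  | [], queue => queue
  | command :: rest, queue =>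
    if PySem.Str.startswith command "PUSH" then
      match PySem.Str.pyGet? command (-1) with
      | some ch => lqLoopA rest (queue ++ [ch])
      | none => lqLoopA rest queue
    else if queue.isEmpty then lqLoopA rest queue
    else lqLoopA rest queue.tail

def letter_queue_2 (commands : List String) : String :=
  String.ofList (lqLoopA commands [])

-- ===== PORT B =====
-- B's loop: collect pushed letters, keep only the count of survivors
def lqLoopB : List String → List Char → Nat → List Char × Nat
  | [], pushed, size => (pushed, size)
  | command :: rest, pushed, size =>
    if PySem.Str.startswith command "PUSH" then
      match PySem.Str.pyGet? command (-1) with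
      | some ch => lqLoopB rest (pushed ++ [ch]) (size + 1)
      | none => lqLoopB rest pushed size
    else if size ≠ 0 then lqLoopB rest pushed (size - 1)
    else lqLoopB rest pushed size

def letter_queue_2_alt (commands : List String) : String :=
  let r := lqLoopB commands [] 0
  String.ofList (r.1.drop (r.1.length - r.2))

-- ===== PRECONDITION & SPEC =====
def Spec_letter_queue_2 (commands : List String) (out : String) : Prop := out = letter_queue_2_alt commands
instance (commands : List String) (out : String) : Decidable (Spec_letter_queue_2 commands out) := by unfold Spec_letter_queue_2; infer_instance

-- ===== CLAIM (what is proved, stated in full; the proofs are below) =====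
def Claim_equal_letter_queue_2 : Prop := ∀ (commands : List String), Dom_letter_queue_2 commands → Spec_letter_queue_2 commands (letter_queue_2 commands)

-- ===== LEMMAS AND PROOFS =====

-- invariant: A's queue is exactly the length-`size` suffix of `pushed`
theorem lq_invariant (cmds : List String) :
    ∀ (pushed : List Char) (size : Nat), size ≤ pushed.length →
      lqLoopA cmds (pushed.drop (pushed.length - size)) =
        (lqLoopB cmds pushed size).1.drop
          ((lqLoopB cmds pushed size).1.length - (lqLoopB cmds pushed size).2) := by
  induction cmds with
  | nil => intro pushed size h; simp [lqLoopA, lqLoopB]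
  | cons command rest ih =>
    intro pushed size h
    cases hp : PySem.Str.startswith command "PUSH" with
    | true =>
      cases hg : PySem.Str.pyGet? command (-1) with
      | some ch =>
        have key : (pushed ++ [ch]).drop ((pushed ++ [ch]).length - (size + 1)) =
            pushed.drop (pushed.length - size) ++ [ch] := by
          rw [List.drop_append_of_le_length (by simp)]
          congr 2
          simp
        simp only [lqLoopA, lqLoopB, hp, hg, if_true]
        rw [← key]
        exact ih (pushed ++ [ch]) (size + 1) (by simp; exact h)
      | none =>
        simp only [lqLoopA, lqLoopB, hp, hg, if_true]
        exact ih pushed size h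
    | false =>
      have hlen : (pushed.drop (pushed.length - size)).length = size := by
        simp; omega
      by_cases hz : size = 0
      · subst hz
        have he : (pushed.drop (pushed.length - 0)).isEmpty = true := by simp
        simp only [lqLoopA, lqLoopB, hp, Bool.false_eq_true, if_false, ne_eq,
          not_true_eq_false, he, if_true]
        exact ih pushed 0 (by omega)
      · have he : (pushed.drop (pushed.length - size)).isEmpty = false := by
          rw [List.isEmpty_eq_false_iff, ← List.length_pos_iff, hlen]
          omega
        have ht : (pushed.drop (pushed.length - size)).tail =
            pushed.drop (pushed.length - (size - 1)) := by
          rw [List.tail_drop]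
          congr 1
          omega
        simp only [lqLoopA, lqLoopB, hp, Bool.false_eq_true, if_false, hz, ne_eq,
          not_false_eq_true, if_true, he, ht]
        exact ih pushed (size - 1) (by omega)

-- ===== VERDICT (by name: the statement is the Claim_ definition above) =====
theorem letter_queue_2_spec : Claim_equal_letter_queue_2 := by
  intro commands _
  unfold Spec_letter_queue_2 letter_queue_2 letter_queue_2_alt
  have h := lq_invariant commands [] 0 (by simp)
  simp only [List.drop_nil, List.length_nil] at h
  simp [h]
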